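-- pv_equiv track=rewrite | github.com/1st-award/codetree-TILs | 240110/흥미로운 숫자 2/interesting-numbers-2.py | solution
-- ===== SOURCE A (Python) =====
-- def solution(X, Y):
--     count = 0
--     for n in range(X, Y+1):
--         numbers = list(str(n))
--         include_nums = list(set(numbers))
--         if len(include_nums) != 2:
--             continue
--
--         if numbers.count(include_nums[0]) == 1 or numbers.count(include_nums[1]) == 1:
--             count += 1
--     return count
-- ===== SOURCE B (Python) =====
-- def solution(X, Y):
--     total = 0
--     for n in range(X, Y + 1):
--         s = sorted(str(n))
--         # exactly two distinct symbols with one of them a singleton  <=>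
--         # the sorted digit string is a b^k or a^k b (a < b, k >= 1):
--         # endpoints differ and the string is constant right of index 0
--         # or constant left of the last index.
--         if s[0] != s[-1] and (s[1] == s[-1] or s[-2] == s[0]):
--             total += 1
--     return total
-- ===== Notes on version B (the rewrite author's own statement) =====
-- stated objective: alternative
-- what changed: Per number B sorts the digit string and decides the property by inspecting only the two boundary pairs of the sorted list (sorted is a b^k or a^k b), replacing A's set-dedup plus two list.count scans; no set and no counting at all.
import Mathlib
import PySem

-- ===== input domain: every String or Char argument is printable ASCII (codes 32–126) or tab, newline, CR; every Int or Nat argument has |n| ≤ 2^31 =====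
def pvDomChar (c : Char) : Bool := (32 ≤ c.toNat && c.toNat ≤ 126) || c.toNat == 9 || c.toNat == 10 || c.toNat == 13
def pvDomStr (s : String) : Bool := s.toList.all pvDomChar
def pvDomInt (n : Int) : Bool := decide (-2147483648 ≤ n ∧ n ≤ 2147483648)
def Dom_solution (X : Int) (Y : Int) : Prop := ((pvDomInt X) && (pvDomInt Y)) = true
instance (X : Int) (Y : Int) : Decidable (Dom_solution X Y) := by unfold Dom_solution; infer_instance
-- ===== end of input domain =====

-- B sorts each number's digit string and decides the property from the two
-- boundary pairs of the sorted list alone (sorted = a b^k or a^k b), replacing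
-- A's set-dedup plus two list.count scans; same return value (objective: alternative).
-- ===== PORT A =====
def solution (X : Int) (Y : Int) : Int :=
  (PySem.List.pyRange X (Y + 1) 1).foldl (fun count n =>
    let numbers := PySem.Int.toChars n
    let include_nums := PySem.Set.ofList numbers
    if include_nums.length ≠ 2 then count
    else if PySem.List.count numbers (PySem.List.pyGetD include_nums 0 ' ') == 1
         || PySem.List.count numbers (PySem.List.pyGetD include_nums 1 ' ') == 1 then count + 1
    else count) 0

-- ===== PORT B =====
-- s[1] and s[-2] are only reached when s[0] != s[-1] (Python's short-circuit),
-- which forces len(s) >= 2, so the pyGetD defaults are never used.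
def solution_alt (X : Int) (Y : Int) : Int :=
  (PySem.List.pyRange X (Y + 1) 1).foldl (fun total n =>
    let s := PySem.List.sorted (PySem.Int.toChars n) (fun c => c) false
    if PySem.List.pyGetD s 0 ' ' ≠ PySem.List.pyGetD s (-1) ' ' ∧
       (PySem.List.pyGetD s 1 ' ' = PySem.List.pyGetD s (-1) ' ' ∨
        PySem.List.pyGetD s (-2) ' ' = PySem.List.pyGetD s 0 ' ')
    then total + 1 else total) 0

-- ===== PRECONDITION & SPEC =====
def Spec_solution (X : Int) (Y : Int) (out : Int) : Prop := out = solution_alt X Y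
instance (X : Int) (Y : Int) (out : Int) : Decidable (Spec_solution X Y out) := by unfold Spec_solution; infer_instance

-- ===== CLAIM =====
def Claim_equal_solution : Prop := ∀ (X : Int) (Y : Int), Dom_solution X Y → Spec_solution X Y (solution X Y)

-- ===== LEMMAS AND PROOFS =====

theorem pg0 (t : List Char) (h : 0 < t.length) : PySem.List.pyGetD t 0 ' ' = t[0]'h := by
  simp [PySem.List.pyGetD, PySem.List.pyGet?, PySem.List.pyIdx?, h]
theorem pgm1 (t : List Char) (h : 0 < t.length) : PySem.List.pyGetD t (-1) ' ' = t[t.length-1]'(by omega) := by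
  rw [show PySem.List.pyGetD t (-1) ' '
      = ((if 1 ≤ t.length then some (t.length - 1) else none).bind fun a => t[a]?).getD ' ' by
    simp [PySem.List.pyGetD, PySem.List.pyGet?, PySem.List.pyIdx?]]
  rw [if_pos (by omega)]
  simp [List.getElem?_eq_getElem (by omega : t.length - 1 < t.length)]
theorem pg1 (t : List Char) (h : 1 < t.length) : PySem.List.pyGetD t 1 ' ' = t[1]'h := by
  rw [show PySem.List.pyGetD t 1 ' '
      = ((if 1 < t.length then some 1 else none).bind fun a => t[a]?).getD ' ' by
    simp [PySem.List.pyGetD, PySem.List.pyGet?, PySem.List.pyIdx?]]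
  rw [if_pos h]
  simp [List.getElem?_eq_getElem h]
theorem pgm2 (t : List Char) (h : 1 < t.length) : PySem.List.pyGetD t (-2) ' ' = t[t.length-2]'(by omega) := by
  rw [show PySem.List.pyGetD t (-2) ' '
      = ((if 2 ≤ t.length then some (t.length - 2) else none).bind fun a => t[a]?).getD ' ' by
    simp [PySem.List.pyGetD, PySem.List.pyGet?, PySem.List.pyIdx?]]
  rw [if_pos (by omega)]
  simp [List.getElem?_eq_getElem (by omega : t.length - 2 < t.length)]

def pvShape (cs : List Char) : Prop :=
  ∃ a b k, a < b ∧ 1 ≤ k ∧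
    ((PySem.List.sorted cs (fun c => c) false) = a :: List.replicate k b ∨
     (PySem.List.sorted cs (fun c => c) false) = List.replicate k a ++ [b])

theorem ends (t : List Char)
    (hmono : ∀ p q, p ≤ q → q < t.length → t.getD p ' ' ≤ t.getD q ' ')
    (a b : Char) (hab : a < b)
    (hat : a ∈ t) (hbt : b ∈ t) (hmt : ∀ z ∈ t, z = a ∨ z = b) :
    2 ≤ t.length ∧ t.getD 0 ' ' = a ∧ t.getD (t.length - 1) ' ' = b := by
  have hL : 2 ≤ t.length := by
    rcases t with _ | ⟨c, _ | ⟨d, r⟩⟩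
    · simp at hat
    · simp at hat hbt
      exact absurd (hat ▸ hbt ▸ rfl) hab.ne
    · simp
  refine ⟨hL, ?_, ?_⟩
  · obtain ⟨i, hi, hia⟩ := List.getElem_of_mem hat
    have hle : t.getD 0 ' ' ≤ a := by
      have := hmono 0 i (Nat.zero_le i) hi
      rwa [List.getD_eq_getElem _ _ hi, hia] at this
    have hm : t.getD 0 ' ' ∈ t := by
      rw [List.getD_eq_getElem _ _ (by omega)]
      exact List.getElem_mem _
    rcases hmt _ hm with h | h
    · exact h
    · exact absurd (h ▸ hle) (not_le.mpr hab)
  · obtain ⟨j, hj, hjb⟩ := List.getElem_of_mem hbt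
    have hle : b ≤ t.getD (t.length - 1) ' ' := by
      have := hmono j (t.length - 1) (by omega) (by omega)
      rwa [List.getD_eq_getElem _ _ hj, hjb] at this
    have hm : t.getD (t.length - 1) ' ' ∈ t := by
      rw [List.getD_eq_getElem _ _ (by omega)]
      exact List.getElem_mem _
    rcases hmt _ hm with h | h
    · exact absurd (h ▸ hle) (not_le.mpr hab)
    · exact h

-- generic: value-boundedness between equal getD endpoints forces constancy
theorem cons_shape (t : List Char) (a b : Char) (_hab : a ≠ b)
    (hmt : ∀ z ∈ t, z = a ∨ z = b) (hne : t ≠ [])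
    (h0 : t.getD 0 ' ' = a) (hc : t.count a = 1) :
    t = a :: List.replicate (t.length - 1) b := by
  match t, hne with
  | c :: r, _ =>
    simp only [List.getD_cons_zero] at h0
    subst h0
    have hr : r.count c = 0 := by
      simpa [List.count_cons_self] using hc
    have : ∀ z ∈ r, z = b := by
      intro z hz
      rcases hmt z (by simp [hz]) with h | h
      · exact absurd (h ▸ hz) (List.count_eq_zero.mp hr)
      · exact h
    have hrep := List.eq_replicate_of_mem this
    rw [show (c :: r).length - 1 = r.length by simp, ← hrep]

theorem snoc_shape (t : List Char) (a b : Char) (hab : a ≠ b)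
    (hmt : ∀ z ∈ t, z = a ∨ z = b) (hne : t ≠ [])
    (hl : t.getD (t.length - 1) ' ' = b) (hc : t.count b = 1) :
    t = List.replicate (t.length - 1) a ++ [b] := by
  have hsplit := List.dropLast_append_getLast hne
  have hlast : t.getLast hne = b := by
    rw [List.getLast_eq_getElem, ← List.getD_eq_getElem _ ' ' (by
      have := List.length_pos_iff.mpr hne; omega)]
    exact hl
  have hcd : t.dropLast.count b = 0 := by
    have : t.count b = t.dropLast.count b + 1 := by
      conv_lhs => rw [← hsplit]
      simp [hlast]
    omega
  have hall : ∀ z ∈ t.dropLast, z = a := by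
    intro z hz
    rcases hmt z (by rw [← hsplit]; simp [hz]) with h | h
    · exact h
    · exact absurd (h ▸ hz) (List.count_eq_zero.mp hcd)
  have hrep := List.eq_replicate_of_mem hall
  have hld : t.dropLast.length = t.length - 1 := by simp
  conv_lhs => rw [← hsplit]
  rw [hrep, hlast, hld]

theorem toChars_ne_nil (n : Int) : PySem.Int.toChars n ≠ [] := by
  unfold PySem.Int.toChars
  split
  · simp
  · have := Nat.length_toDigits_pos (b := 10) (n := n.toNat)
    intro h
    rw [h] at this
    simp at this

-- pyGetD ↔ getD at the four used indices
theorem pgD0 (t : List Char) (h : 0 < t.length) : PySem.List.pyGetD t 0 ' ' = t.getD 0 ' ' := by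
  rw [pg0 t h, List.getD_eq_getElem _ _ h]
theorem pgDm1 (t : List Char) (h : 0 < t.length) :
    PySem.List.pyGetD t (-1) ' ' = t.getD (t.length - 1) ' ' := by
  rw [pgm1 t h, List.getD_eq_getElem _ _ (by omega)]
theorem pgD1 (t : List Char) (h : 1 < t.length) : PySem.List.pyGetD t 1 ' ' = t.getD 1 ' ' := by
  rw [pg1 t h, List.getD_eq_getElem _ _ h]
theorem pgDm2 (t : List Char) (h : 1 < t.length) :
    PySem.List.pyGetD t (-2) ' ' = t.getD (t.length - 2) ' ' := by
  rw [pgm2 t h, List.getD_eq_getElem _ _ (by omega)]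

theorem sorted_mono_getD (cs : List Char) (p q : Nat) (hpq : p ≤ q)
    (hq : q < (PySem.List.sorted cs (fun c => c) false).length) :
    (PySem.List.sorted cs (fun c => c) false).getD p ' '
      ≤ (PySem.List.sorted cs (fun c => c) false).getD q ' ' := by
  rw [List.getD_eq_getElem _ _ (lt_of_le_of_lt hpq hq), List.getD_eq_getElem _ _ hq]
  exact PySem.List.sorted_id_getElem_mono cs hpq hq

-- mono forces constancy between equal getD endpoints
theorem mid_shape_left (t : List Char)
    (hmono : ∀ p q, p ≤ q → q < t.length → t.getD p ' ' ≤ t.getD q ' ')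
    (hL : 2 ≤ t.length) (h1 : t.getD 1 ' ' = t.getD (t.length - 1) ' ') :
    t = t.getD 0 ' ' :: List.replicate (t.length - 1) (t.getD (t.length - 1) ' ') := by
  apply List.ext_getElem
  · simp; omega
  · intro i hi hi2
    rcases Nat.eq_zero_or_pos i with h | h
    · subst h
      rw [← List.getD_eq_getElem t ' ' hi]
      simp
    · have : (t.getD 0 ' ' :: List.replicate (t.length - 1) (t.getD (t.length - 1) ' '))[i]'hi2
          = t.getD (t.length - 1) ' ' := by
        have hi' : i - 1 < t.length - 1 := by omega
        rcases Nat.exists_eq_add_of_lt h with ⟨m, hm⟩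
        subst hm
        simp
      rw [this, ← List.getD_eq_getElem t ' ' hi]
      have hub : t.getD i ' ' ≤ t.getD (t.length - 1) ' ' := hmono i (t.length - 1) (by omega) (by omega)
      have hlb : t.getD 1 ' ' ≤ t.getD i ' ' := hmono 1 i (by omega) hi
      rw [h1] at hlb
      exact le_antisymm hub hlb

theorem mid_shape_right (t : List Char)
    (hmono : ∀ p q, p ≤ q → q < t.length → t.getD p ' ' ≤ t.getD q ' ')
    (hL : 2 ≤ t.length) (h2 : t.getD (t.length - 2) ' ' = t.getD 0 ' ') :
    t = List.replicate (t.length - 1) (t.getD 0 ' ') ++ [t.getD (t.length - 1) ' '] := by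
  apply List.ext_getElem
  · simp; omega
  · intro i hi hi2
    by_cases h : i < t.length - 1
    · have : (List.replicate (t.length - 1) (t.getD 0 ' ') ++ [t.getD (t.length - 1) ' '])[i]'hi2
          = t.getD 0 ' ' := by
        rw [List.getElem_append_left (by simpa using h)]
        simp
      rw [this, ← List.getD_eq_getElem t ' ' hi]
      have hlb : t.getD 0 ' ' ≤ t.getD i ' ' := hmono 0 i (Nat.zero_le i) hi
      have hub : t.getD i ' ' ≤ t.getD (t.length - 2) ' ' := hmono i (t.length - 2) (by omega) (by omega)
      rw [h2] at hub
      exact le_antisymm hub hlb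
    · have hieq : i = t.length - 1 := by omega
      subst hieq
      have : (List.replicate (t.length - 1) (t.getD 0 ' ') ++ [t.getD (t.length - 1) ' '])[t.length - 1]'hi2
          = t.getD (t.length - 1) ' ' := by
        rw [List.getElem_append_right (by simp)]
        simp
      rw [this, ← List.getD_eq_getElem t ' ' hi]

-- getD / count / membership on the two canonical forms
theorem left_getD (a b : Char) (k : Nat) (hk : 1 ≤ k) :
    (a :: List.replicate k b).getD 0 ' ' = a ∧
    (a :: List.replicate k b).getD 1 ' ' = b ∧
    (a :: List.replicate k b).getD k ' ' = b := by
  refine ⟨by simp, ?_, ?_⟩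
  · rcases Nat.exists_eq_add_of_le hk with ⟨m, hm⟩
    subst hm
    simp
  · rcases Nat.exists_eq_add_of_le hk with ⟨m, hm⟩
    subst hm
    rw [List.getD_eq_getElem _ _ (by simp)]
    rw [show (1 + m) = 0 + m + 1 by omega]
    simp

theorem right_getD (a b : Char) (k : Nat) (hk : 1 ≤ k) :
    (List.replicate k a ++ [b]).getD 0 ' ' = a ∧
    (List.replicate k a ++ [b]).getD (k - 1) ' ' = a ∧
    (List.replicate k a ++ [b]).getD k ' ' = b := by
  refine ⟨?_, ?_, ?_⟩
  · rw [List.getD_eq_getElem _ _ (by simp), List.getElem_append_left (by simpa using by omega)]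
    simp
  · rw [List.getD_eq_getElem _ _ (by simp), List.getElem_append_left (by simpa using by omega)]
    simp
  · rw [List.getD_eq_getElem _ _ (by simp), List.getElem_append_right (by simp)]
    simp

theorem left_facts (a b : Char) (k : Nat) (hab : a ≠ b) (hk : 1 ≤ k) :
    (∀ z, z ∈ (a :: List.replicate k b) ↔ (z = a ∨ z = b)) ∧
    (a :: List.replicate k b).count a = 1 := by
  constructor
  · intro z
    constructor
    · intro hz
      rcases List.mem_cons.mp hz with h | h
      · exact Or.inl h
      · exact Or.inr (List.eq_of_mem_replicate h)
    · rintro (rfl | rfl)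
      · simp
      · simp [List.mem_replicate]; omega
  · simp [List.count_replicate]
    intro h
    exact absurd h.symm hab

theorem right_facts (a b : Char) (k : Nat) (hab : a ≠ b) (hk : 1 ≤ k) :
    (∀ z, z ∈ (List.replicate k a ++ [b]) ↔ (z = a ∨ z = b)) ∧
    (List.replicate k a ++ [b]).count b = 1 := by
  constructor
  · intro z
    constructor
    · intro hz
      rcases List.mem_append.mp hz with h | h
      · exact Or.inl (List.eq_of_mem_replicate h)
      · exact Or.inr (by simpa using h)
    · rintro (rfl | rfl)
      · simp [List.mem_replicate]; omega
      · simp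
  · have : (List.replicate k a).count b = 0 := by
      simp [List.count_replicate]
      intro h
      exact absurd h hab
    simp [List.count_append, this]

theorem toShape (cs : List Char) (a b : Char) (hab : a < b) (ha : a ∈ cs) (hb : b ∈ cs)
    (hmem : ∀ z ∈ cs, z = a ∨ z = b) (hcnt : cs.count a = 1 ∨ cs.count b = 1) :
    pvShape cs := by
  have hperm := PySem.List.sorted_perm cs (fun c => c) false
  have hmono := sorted_mono_getD cs
  have hat : a ∈ PySem.List.sorted cs (fun c => c) false := hperm.mem_iff.mpr ha
  have hbt : b ∈ PySem.List.sorted cs (fun c => c) false := hperm.mem_iff.mpr hb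
  have hmt : ∀ z ∈ PySem.List.sorted cs (fun c => c) false, z = a ∨ z = b :=
    fun z hz => hmem z (hperm.mem_iff.mp hz)
  obtain ⟨hL, h0, hl⟩ := ends _ hmono a b hab hat hbt hmt
  have hneT : PySem.List.sorted cs (fun c => c) false ≠ [] := by
    intro h
    rw [h] at hL
    simp at hL
  rcases hcnt with hc | hc
  · exact ⟨a, b, (PySem.List.sorted cs (fun c => c) false).length - 1, hab, by omega,
      Or.inl (cons_shape _ a b hab.ne hmt hneT h0 (by rw [hperm.count_eq]; exact hc))⟩
  · exact ⟨a, b, (PySem.List.sorted cs (fun c => c) false).length - 1, hab, by omega,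
      Or.inr (snoc_shape _ a b hab.ne hmt hneT hl (by rw [hperm.count_eq]; exact hc))⟩

theorem shapeA (cs : List Char) (hs : pvShape cs) :
    (PySem.Set.ofList cs).length = 2 ∧
    (cs.count (PySem.List.pyGetD (PySem.Set.ofList cs) 0 ' ') = 1 ∨
     cs.count (PySem.List.pyGetD (PySem.Set.ofList cs) 1 ' ') = 1) := by
  obtain ⟨a, b, k, hab, hk, hcase⟩ := hs
  have hperm := PySem.List.sorted_perm cs (fun c => c) false
  have hmemiff : ∀ z, z ∈ cs ↔ (z = a ∨ z = b) := by
    intro z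
    rw [← hperm.mem_iff]
    rcases hcase with h | h
    · rw [h]; exact (left_facts a b k hab.ne hk).1 z
    · rw [h]; exact (right_facts a b k hab.ne hk).1 z
  have hnd := PySem.Set.nodup_ofList cs
  have htf : (PySem.Set.ofList cs).toFinset = ({a, b} : Finset Char) := by
    ext z
    simp [List.mem_toFinset, PySem.Set.mem_ofList, hmemiff z]
  have hlen : (PySem.Set.ofList cs).length = 2 := by
    rw [← List.toFinset_card_of_nodup hnd, htf, Finset.card_pair hab.ne]
  have hcnt1 : cs.count a = 1 ∨ cs.count b = 1 := by
    rcases hcase with h | h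
    · left
      rw [← hperm.count_eq, h]
      exact (left_facts a b k hab.ne hk).2
    · right
      rw [← hperm.count_eq, h]
      exact (right_facts a b k hab.ne hk).2
  obtain ⟨x, y, hd⟩ := List.length_eq_two.mp hlen
  have hxy : x ≠ y := by
    have := hnd
    rw [hd] at this
    simp at this
    exact this
  have hx : x = a ∨ x = b := by
    rw [← hmemiff x, ← PySem.Set.mem_ofList, hd]; simp
  have hy : y = a ∨ y = b := by
    rw [← hmemiff y, ← PySem.Set.mem_ofList, hd]; simp
  have hg0 : PySem.List.pyGetD (PySem.Set.ofList cs) 0 ' ' = x := by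
    rw [hd]
    simp [PySem.List.pyGetD, PySem.List.pyGet?, PySem.List.pyIdx?]
  have hg1 : PySem.List.pyGetD (PySem.Set.ofList cs) 1 ' ' = y := by
    rw [hd]
    simp [PySem.List.pyGetD, PySem.List.pyGet?, PySem.List.pyIdx?]
  refine ⟨hlen, ?_⟩
  rw [hg0, hg1]
  rcases hcnt1 with hc | hc
  · rcases hx with rfl | hxb
    · exact Or.inl hc
    · rcases hy with rfl | hyb
      · exact Or.inr hc
      · exact absurd (hxb.trans hyb.symm) hxy
  · rcases hx with rfl | hxb
    · rcases hy with hya | rfl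
      · exact absurd (hya ▸ hxy) (by simp_all)
      · exact Or.inr hc
    · exact Or.inl (hxb ▸ hc)

theorem shapeB (cs : List Char) (hs : pvShape cs) :
    PySem.List.pyGetD (PySem.List.sorted cs (fun c => c) false) 0 ' '
      ≠ PySem.List.pyGetD (PySem.List.sorted cs (fun c => c) false) (-1) ' ' ∧
    (PySem.List.pyGetD (PySem.List.sorted cs (fun c => c) false) 1 ' '
       = PySem.List.pyGetD (PySem.List.sorted cs (fun c => c) false) (-1) ' ' ∨
     PySem.List.pyGetD (PySem.List.sorted cs (fun c => c) false) (-2) ' '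
       = PySem.List.pyGetD (PySem.List.sorted cs (fun c => c) false) 0 ' ') := by
  obtain ⟨a, b, k, hab, hk, hcase⟩ := hs
  rcases hcase with h | h
  · rw [h]
    have hlen : (a :: List.replicate k b).length = k + 1 := by simp
    have h2 : 1 < (a :: List.replicate k b).length := by simp; omega
    obtain ⟨g0, g1, gk⟩ := left_getD a b k hk
    rw [pgD0 _ (by omega), pgDm1 _ (by omega), pgD1 _ h2, hlen]
    refine ⟨?_, Or.inl ?_⟩
    · rw [Nat.add_sub_cancel, g0, gk]
      exact hab.ne
    · rw [Nat.add_sub_cancel, g1, gk]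
  · rw [h]
    have hlen : (List.replicate k a ++ [b]).length = k + 1 := by simp
    have h2 : 1 < (List.replicate k a ++ [b]).length := by simp; omega
    obtain ⟨g0, gk1, gk⟩ := right_getD a b k hk
    rw [pgD0 _ (by omega), pgDm1 _ (by omega), pgDm2 _ h2, hlen]
    refine ⟨?_, Or.inr ?_⟩
    · rw [Nat.add_sub_cancel, g0, gk]
      exact hab.ne
    · rw [show k + 1 - 2 = k - 1 by omega, g0, gk1]

theorem BtoShape (cs : List Char) (hne : cs ≠ [])
    (hB : PySem.List.pyGetD (PySem.List.sorted cs (fun c => c) false) 0 ' '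
      ≠ PySem.List.pyGetD (PySem.List.sorted cs (fun c => c) false) (-1) ' ' ∧
    (PySem.List.pyGetD (PySem.List.sorted cs (fun c => c) false) 1 ' '
       = PySem.List.pyGetD (PySem.List.sorted cs (fun c => c) false) (-1) ' ' ∨
     PySem.List.pyGetD (PySem.List.sorted cs (fun c => c) false) (-2) ' '
       = PySem.List.pyGetD (PySem.List.sorted cs (fun c => c) false) 0 ' ')) :
    pvShape cs := by
  have hmono := sorted_mono_getD cs
  have hpos : 0 < (PySem.List.sorted cs (fun c => c) false).length := by
    rw [PySem.List.length_sorted]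
    exact List.length_pos_iff.mpr hne
  obtain ⟨hne01, hor⟩ := hB
  rw [pgD0 _ hpos, pgDm1 _ hpos] at hne01
  have hL2 : 2 ≤ (PySem.List.sorted cs (fun c => c) false).length := by
    by_contra hcon
    have h1 : (PySem.List.sorted cs (fun c => c) false).length - 1 = 0 := by omega
    rw [h1] at hne01
    exact hne01 rfl
  rw [pgD1 _ (by omega), pgDm1 _ hpos] at hor
  rw [pgDm2 _ (by omega), pgD0 _ hpos] at hor
  have hab : (PySem.List.sorted cs (fun c => c) false).getD 0 ' '
      < (PySem.List.sorted cs (fun c => c) false).getD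
          ((PySem.List.sorted cs (fun c => c) false).length - 1) ' ' :=
    lt_of_le_of_ne (hmono 0 _ (Nat.zero_le _) (by omega)) hne01
  rcases hor with h1 | h2
  · exact ⟨_, _, (PySem.List.sorted cs (fun c => c) false).length - 1, hab, by omega,
      Or.inl (mid_shape_left _ hmono hL2 h1)⟩
  · exact ⟨_, _, (PySem.List.sorted cs (fun c => c) false).length - 1, hab, by omega,
      Or.inr (mid_shape_right _ hmono hL2 h2)⟩

theorem AB_iff (cs : List Char) (hne : cs ≠ []) :
    ((PySem.Set.ofList cs).length = 2 ∧
     (cs.count (PySem.List.pyGetD (PySem.Set.ofList cs) 0 ' ') = 1 ∨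
      cs.count (PySem.List.pyGetD (PySem.Set.ofList cs) 1 ' ') = 1)) ↔
    (PySem.List.pyGetD (PySem.List.sorted cs (fun c => c) false) 0 ' '
      ≠ PySem.List.pyGetD (PySem.List.sorted cs (fun c => c) false) (-1) ' ' ∧
    (PySem.List.pyGetD (PySem.List.sorted cs (fun c => c) false) 1 ' '
       = PySem.List.pyGetD (PySem.List.sorted cs (fun c => c) false) (-1) ' ' ∨
     PySem.List.pyGetD (PySem.List.sorted cs (fun c => c) false) (-2) ' '
       = PySem.List.pyGetD (PySem.List.sorted cs (fun c => c) false) 0 ' ')) := by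
  constructor
  · rintro ⟨h2, hcnt⟩
    obtain ⟨x, y, hd⟩ := List.length_eq_two.mp h2
    have hnd := PySem.Set.nodup_ofList cs
    rw [hd] at hnd
    simp at hnd
    have hxc : x ∈ cs := (PySem.Set.mem_ofList cs x).mp (by rw [hd]; simp)
    have hyc : y ∈ cs := (PySem.Set.mem_ofList cs y).mp (by rw [hd]; simp)
    have hmemcs : ∀ z ∈ cs, z = x ∨ z = y := by
      intro z hz
      have := (PySem.Set.mem_ofList cs z).mpr hz
      rw [hd] at this
      simpa using this
    have hg0 : PySem.List.pyGetD (PySem.Set.ofList cs) 0 ' ' = x := by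
      rw [hd]
      simp [PySem.List.pyGetD, PySem.List.pyGet?, PySem.List.pyIdx?]
    have hg1 : PySem.List.pyGetD (PySem.Set.ofList cs) 1 ' ' = y := by
      rw [hd]
      simp [PySem.List.pyGetD, PySem.List.pyGet?, PySem.List.pyIdx?]
    rw [hg0, hg1] at hcnt
    rcases lt_or_gt_of_ne hnd with hlt | hgt
    · exact shapeB cs (toShape cs x y hlt hxc hyc hmemcs hcnt)
    · exact shapeB cs (toShape cs y x hgt hyc hxc
        (fun z hz => (hmemcs z hz).symm) hcnt.symm)
  · intro hB
    exact shapeA cs (BtoShape cs hne hB)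


theorem body_eq (count : Int) (n : Int) :
    (let numbers := PySem.Int.toChars n
     let include_nums := PySem.Set.ofList numbers
     if include_nums.length ≠ 2 then count
     else if PySem.List.count numbers (PySem.List.pyGetD include_nums 0 ' ') == 1
          || PySem.List.count numbers (PySem.List.pyGetD include_nums 1 ' ') == 1 then count + 1
     else count)
    =
    (let s := PySem.List.sorted (PySem.Int.toChars n) (fun c => c) false
     if PySem.List.pyGetD s 0 ' ' ≠ PySem.List.pyGetD s (-1) ' ' ∧
        (PySem.List.pyGetD s 1 ' ' = PySem.List.pyGetD s (-1) ' ' ∨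
         PySem.List.pyGetD s (-2) ' ' = PySem.List.pyGetD s 0 ' ')
     then count + 1 else count) := by
  have hiff := AB_iff (PySem.Int.toChars n) (toChars_ne_nil n)
  simp only [PySem.List.count_eq]
  by_cases hA : ((PySem.Set.ofList (PySem.Int.toChars n)).length = 2 ∧
      ((PySem.Int.toChars n).count
          (PySem.List.pyGetD (PySem.Set.ofList (PySem.Int.toChars n)) 0 ' ') = 1 ∨
       (PySem.Int.toChars n).count
          (PySem.List.pyGetD (PySem.Set.ofList (PySem.Int.toChars n)) 1 ' ') = 1))
  · rw [if_neg (by simp [hA.1]), if_pos (by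
      rcases hA.2 with h | h
      · simp [h]
      · simp [h]), if_pos (hiff.mp hA)]
  · rw [if_neg ((not_iff_not.mpr hiff).mp hA)]
    by_cases h2 : (PySem.Set.ofList (PySem.Int.toChars n)).length = 2
    · rw [if_neg (by simp [h2]), if_neg (by
        intro hcon
        apply hA
        refine ⟨h2, ?_⟩
        rcases Bool.or_eq_true_iff.mp hcon with h | h
        · exact Or.inl (by simpa using h)
        · exact Or.inr (by simpa using h))]
    · rw [if_pos h2]

theorem folds_eq (X Y : Int) : solution X Y = solution_alt X Y := by
  unfold solution solution_alt
  apply PySem.List.foldl_congr_mem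
  intro acc x _
  exact body_eq acc x

-- ===== VERDICT =====
theorem solution_spec : Claim_equal_solution := by
  intro X Y _
  unfold Spec_solution
  exact folds_eq X Y
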